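-- pv_equiv track=rewrite | github.com/mayman150/A-Comparative-Study-between-TensorFlow-and-PyTorch | Usability_Functionality/Documentation_Metrics/APXI_metric.py | CalculateSpt
-- ===== SOURCE A (Python) =====
-- def CalculateSpt(params_type_method):
--     #Given the param Name and Type List we calculate the S_pt
--     if params_type_method == None:
--         return 0
--     lens = len(params_type_method)
--     Spt = 0
--     for i in range(1,lens):
--         if params_type_method[i] == params_type_method[i-1]:
--             Spt += 1
--
--     return Spt
-- ===== SOURCE B (Python) =====
-- def _runs(xs):
--     # number of maximal runs of equal consecutive elements
--     if not xs:
--         return 0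
--     runs = 1
--     prev = xs[0]
--     for x in xs[1:]:
--         if x != prev:
--             runs += 1
--         prev = x
--     return runs
--
--
-- def CalculateSpt(params_type_method):
--     if params_type_method is None:
--         return 0
--     return len(params_type_method) - _runs(params_type_method)
-- ===== Notes on version B (the rewrite author's own statement) =====
-- stated objective: alternative
-- what changed: B counts adjacent-equal pairs indirectly as len(xs) minus the number of maximal runs of equal consecutive elements (a single fold carrying the previous element), instead of A's index loop comparing xs[i] with xs[i-1].
import Mathlib
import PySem

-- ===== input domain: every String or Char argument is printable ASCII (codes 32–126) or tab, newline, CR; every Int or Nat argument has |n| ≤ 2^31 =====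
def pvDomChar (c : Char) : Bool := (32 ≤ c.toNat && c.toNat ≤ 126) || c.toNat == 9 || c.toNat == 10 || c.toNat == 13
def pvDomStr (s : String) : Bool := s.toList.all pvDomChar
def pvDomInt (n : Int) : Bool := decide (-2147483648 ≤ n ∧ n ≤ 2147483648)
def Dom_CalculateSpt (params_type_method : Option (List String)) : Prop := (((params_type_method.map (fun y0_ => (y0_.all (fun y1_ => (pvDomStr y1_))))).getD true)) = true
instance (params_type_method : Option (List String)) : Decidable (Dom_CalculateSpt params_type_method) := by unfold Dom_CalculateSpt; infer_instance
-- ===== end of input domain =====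

-- B computes the adjacent-equal-pair count as length minus the number of maximal runs
-- of equal consecutive elements (a fold carrying the previous element), instead of A's index loop.


-- ===== PORT A =====
-- literal port of A: index loop 'for i in range(1, lens)'; xs[i] is always in range,
-- so pyGetD with an arbitrary default is exact here
def CalculateSpt (params_type_method : Option (List String)) : Int :=
  match params_type_method with
  | none => 0
  | some xs =>
    let lens : Int := xs.length
    (PySem.List.pyRange 1 lens 1).foldl
      (fun Spt i =>
        if PySem.List.pyGetD xs i "" == PySem.List.pyGetD xs (i - 1) "" then Spt + 1 else Spt)
      0

-- ===== PORT B =====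
-- number of maximal runs of equal consecutive elements (Source B's _runs):
-- a fold over xs[1:] carrying (runs, prev)
def runsIter (xs : List String) : Int :=
  match xs with
  | [] => 0
  | a :: t =>
    (t.foldl (fun s x => (if x != s.2 then s.1 + 1 else s.1, x)) ((1 : Int), a)).1

def CalculateSpt_alt (params_type_method : Option (List String)) : Int :=
  match params_type_method with
  | none => 0
  | some xs => (xs.length : Int) - runsIter xs

-- ===== PRECONDITION & SPEC =====
def Spec_CalculateSpt (params_type_method : Option (List String)) (out : Int) : Prop := out = CalculateSpt_alt params_type_method
instance (params_type_method : Option (List String)) (out : Int) : Decidable (Spec_CalculateSpt params_type_method out) := by unfold Spec_CalculateSpt; infer_instance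

-- ===== CLAIM (what is proved, stated in full; the proofs are below) =====
def Claim_equal_CalculateSpt : Prop := ∀ (params_type_method : Option (List String)), Dom_CalculateSpt params_type_method → Spec_CalculateSpt params_type_method (CalculateSpt params_type_method)

-- ===== LEMMAS AND PROOFS =====

-- recursive run count, a proof-side characterisation of runsIter's fold
def runsAux : List String → Int
  | [] => 0
  | [_] => 1
  | a :: b :: t => (if a == b then 0 else 1) + runsAux (b :: t)

theorem runsIter_fold (t : List String) : ∀ (a : String) (r : Int),
    (t.foldl (fun s x => (if x != s.2 then s.1 + 1 else s.1, x)) (r, a)).1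
      = r + (runsAux (a :: t) - 1) := by
  induction t with
  | nil => intro a r; simp [runsAux]
  | cons b t ih =>
    intro a r
    simp only [List.foldl_cons]
    rw [ih b]
    by_cases h : a = b
    · subst h
      simp [runsAux]
    · have h1 : (a == b) = false := by simp [h]
      have h2 : (b != a) = true := by simp; exact fun hba => h hba.symm
      rw [h2]
      simp only [runsAux, h1, Bool.false_eq_true, if_false, if_true]
      ring

theorem runsIter_eq (xs : List String) : runsIter xs = runsAux xs := by
  cases xs with
  | nil => rfl
  | cons a t => rw [runsIter, runsIter_fold t a 1]; ring

-- adjacent-equal pair count, the common characterisation of both ports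
def pvPairs : List String → Int
  | a :: b :: t => (if a == b then 1 else 0) + pvPairs (b :: t)
  | _ => 0

theorem length_sub_runs (xs : List String) : (xs.length : Int) - runsAux xs = pvPairs xs := by
  match xs with
  | [] => simp [runsAux, pvPairs]
  | [_] => simp [runsAux, pvPairs]
  | a :: b :: t =>
    have ih := length_sub_runs (b :: t)
    simp only [runsAux, pvPairs, List.length_cons] at *
    split_ifs <;> push_cast <;> omega

theorem foldl_if_count {α : Type} (P : α → Bool) (l : List α) (init : Int) :
    l.foldl (fun S i => if P i then S + 1 else S) init = init + (l.countP P : Int) := by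
  induction l generalizing init with
  | nil => simp
  | cons x l ih =>
    simp only [List.foldl_cons, List.countP_cons, ih]
    rcases h : P x with _ | _ <;> simp [h] <;> ring

theorem countP_range_pairs (t : List String) : ∀ (a : String),
    ((List.range t.length).countP
        (fun k => (a :: t).getD (k + 1) "" == (a :: t).getD k "") : Int) = pvPairs (a :: t) := by
  induction t with
  | nil => intro a; simp [pvPairs]
  | cons b t ih =>
    intro a
    rw [List.length_cons, List.range_succ_eq_map, List.countP_cons, List.countP_map]
    have hshift :
        ((fun k => (a :: b :: t).getD (k + 1) "" == (a :: b :: t).getD k "") ∘ Nat.succ)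
          = (fun k => (b :: t).getD (k + 1) "" == (b :: t).getD k "") := by
      funext k
      simp [Function.comp, Nat.succ_eq_add_one]
    have hzero : ((a :: b :: t).getD (0 + 1) "" == (a :: b :: t).getD 0 "") = (a == b) := by
      by_cases h : a = b
      · simp [h, List.getD]
      · simp [List.getD, h]
        exact fun hba => h hba.symm
    rw [hshift, hzero]
    simp only [pvPairs]
    push_cast
    rw [ih b]
    split_ifs <;> omega

theorem fold_eq_pairs (xs : List String) :
    (PySem.List.pyRange 1 (xs.length : Int) 1).foldl
      (fun Spt i =>
        if PySem.List.pyGetD xs i "" == PySem.List.pyGetD xs (i - 1) "" then Spt + 1 else Spt)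
      0 = pvPairs xs := by
  match xs with
  | [] => simp [pvPairs, PySem.List.pyRange_one_eq_nil]
  | a :: t =>
    rw [foldl_if_count (fun i => PySem.List.pyGetD (a :: t) i "" == PySem.List.pyGetD (a :: t) (i - 1) "")]
    rw [PySem.List.pyRange_one]
    have hlen : (((a :: t).length : Int) - 1).toNat = t.length := by simp
    rw [hlen, List.countP_map]
    have hshift :
        ((fun i => PySem.List.pyGetD (a :: t) i "" == PySem.List.pyGetD (a :: t) (i - 1) "") ∘ (fun k : Nat => (1 : Int) + k))
          = (fun k => (a :: t).getD (k + 1) "" == (a :: t).getD k "") := by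
      funext k
      simp only [Function.comp_apply]
      rw [show (1 : Int) + (k : Int) = ((k + 1 : Nat) : Int) by push_cast; ring,
        show ((k + 1 : Nat) : Int) - 1 = ((k : Nat) : Int) by push_cast; ring,
        PySem.List.pyGetD_natCast, PySem.List.pyGetD_natCast]
    rw [hshift, countP_range_pairs t a]
    ring

-- ===== VERDICT (by name: the statement is the Claim_ definition above) =====
theorem CalculateSpt_spec : Claim_equal_CalculateSpt := by
  intro p _
  unfold Spec_CalculateSpt
  cases p with
  | none => rfl
  | some xs =>
    show CalculateSpt (some xs) = CalculateSpt_alt (some xs)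
    simp only [CalculateSpt, CalculateSpt_alt]
    rw [fold_eq_pairs xs, runsIter_eq xs, ← length_sub_runs xs]
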